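-- pv_equiv track=rewrite | github.com/sagemath/sage | src/sage/combinat/bijectionist.py | _non_copying_intersection
-- ===== SOURCE A (Python) =====
-- def _non_copying_intersection(sets):
--     """
--     Return the intersection of the sets.
--
--     If the intersection is equal to one of the sets, return this
--     set.
--
--     EXAMPLES::
--
--         sage: from sage.combinat.bijectionist import _non_copying_intersection
--         sage: A = set(range(7000)); B = set(range(8000));
--         sage: _non_copying_intersection([A, B]) is A
--         True
--
--         sage: A = set([1,2]); B = set([2,3])
--         sage: _non_copying_intersection([A, B])
--         {2}
--     """
--     sets = sorted(sets, key=len)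
--     result = set.intersection(*sets)
--     n = len(result)
--     for s in sets:
--         N = len(s)
--         if n < N:
--             return result
--         if s == result:
--             return s
-- ===== SOURCE B (Python) =====
-- def _non_copying_intersection(sets):
--     # Different strategy: instead of intersecting first and scanning for an equal
--     # set, find the (first) smallest set and test whether it is a subset of all
--     # the others; if so it IS the intersection and is returned as-is, otherwise
--     # the intersection is computed fresh.  Correct because the intersection is
--     # contained in every set, so it can only equal a set of minimal size, and it
--     # equals the smallest set exactly when that set is contained in all sets.
--     sets = list(sets)
--     m = min(sets, key=len)
--     if all(m <= s for s in sets):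
--         return m
--     return set.intersection(*sets)
-- ===== Notes on version B (the rewrite author's own statement) =====
-- stated objective: alternative
-- what changed: B does not intersect-then-scan: it takes the first smallest set via min(key=len) and subset-tests it against all sets, returning it directly on success and computing set.intersection only when the test fails, with no sort and no equality scan.
import Mathlib
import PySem

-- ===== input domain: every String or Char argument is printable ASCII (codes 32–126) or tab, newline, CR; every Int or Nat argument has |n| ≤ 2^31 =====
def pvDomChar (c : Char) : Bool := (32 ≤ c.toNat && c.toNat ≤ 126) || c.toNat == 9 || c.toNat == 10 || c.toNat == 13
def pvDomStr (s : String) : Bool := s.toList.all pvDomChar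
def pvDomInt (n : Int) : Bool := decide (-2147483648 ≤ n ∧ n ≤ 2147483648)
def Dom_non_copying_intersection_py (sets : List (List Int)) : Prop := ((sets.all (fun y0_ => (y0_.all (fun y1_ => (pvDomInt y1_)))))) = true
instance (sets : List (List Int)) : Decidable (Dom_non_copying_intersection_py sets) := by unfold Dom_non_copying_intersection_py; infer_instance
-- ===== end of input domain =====

-- B replaces A's sort+intersect+scan by a different algorithm: find the first smallest
-- set and subset-test it against all sets, computing the intersection only when that
-- test fails (objective: alternative).  A/B return a Python set; its iteration order is
-- not modelled, so both ports represent a fresh intersection canonically in ascending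
-- order (outputs are compared as finite sets).


-- ===== PORT A =====
-- set.intersection(*ss): the common elements, one Python set.  A set's iteration order is
-- not modelled, so we represent this set canonically in ascending order (exact as a set).
def pyIntersectAll (ss : List (List Int)) : List Int :=
  PySem.List.sorted
    (PySem.Set.ofList ((ss.headD []).filter (fun x => ss.all (fun s => s.contains x))))
    (fun x => x) false

-- the 'for s in sets:' loop of A; none = the loop fell through (Python returns None there,
-- unreachable on Pre_)
def nciLoopA (result : List Int) (n : Nat) : List (List Int) → Option (List Int)
  | [] => none
  | s :: rest =>
    let N := s.length
    if n < N then some result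
    else if PySem.Set.equal s result then some s
    else nciLoopA result n rest

def non_copying_intersection_py (sets : List (List Int)) : List Int :=
  let sets' := PySem.List.sorted sets (fun s => s.length) false
  let result := pyIntersectAll sets'
  let n := result.length
  (nciLoopA result n sets').getD []

-- ===== PORT B =====
-- min(sets, key=len) → PySem.List.min? (first minimum); all(m <= s …) → issubset test
def non_copying_intersection_py_alt (sets : List (List Int)) : List Int :=
  match PySem.List.min? sets (fun s => s.length) with
  | none => []   -- unreachable under Pre_: Python's min raises on an empty list
  | some m =>
    if sets.all (fun s => PySem.Set.issubset m s) then m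
    else pyIntersectAll sets

-- ===== PRECONDITION & SPEC =====
-- Pre_ excludes the empty list, on which both Pythons raise (TypeError in A, ValueError
-- in B); the Nodup clause is the set-representation invariant: each inner list stands for
-- a Python set and therefore holds distinct elements (no Python input violates it).
def Pre_non_copying_intersection_py (sets : List (List Int)) : Prop :=
  sets ≠ [] ∧ ∀ s ∈ sets, s.Nodup
instance (sets : List (List Int)) : Decidable (Pre_non_copying_intersection_py sets) := by
  unfold Pre_non_copying_intersection_py; infer_instance

def pvWitness_non_copying_intersection_py : List (List Int) := [[2, 1], [2, 3]]

def Spec_non_copying_intersection_py (sets : List (List Int)) (out : List Int) : Prop := out = non_copying_intersection_py_alt sets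
instance (sets : List (List Int)) (out : List Int) : Decidable (Spec_non_copying_intersection_py sets out) := by unfold Spec_non_copying_intersection_py; infer_instance

-- ===== CLAIM (what is proved, stated in full; the proofs are below) =====
def Claim_equal_non_copying_intersection_py : Prop := ∀ (sets : List (List Int)), Dom_non_copying_intersection_py sets → Pre_non_copying_intersection_py sets → Spec_non_copying_intersection_py sets (non_copying_intersection_py sets)

-- ===== LEMMAS AND PROOFS =====

theorem pyIntersectAll_mem {ss : List (List Int)} (h : ss ≠ []) (x : Int) :
    x ∈ pyIntersectAll ss ↔ ∀ s ∈ ss, x ∈ s := by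
  unfold pyIntersectAll
  rw [PySem.List.mem_sorted, PySem.Set.mem_ofList, List.mem_filter]
  simp only [List.all_eq_true, List.contains_iff_mem]
  constructor
  · rintro ⟨-, h2⟩ s hs; exact h2 s hs
  · intro hall
    refine ⟨?_, fun s hs => hall s hs⟩
    obtain ⟨y, t, rfl⟩ := List.exists_cons_of_ne_nil h
    exact hall y (List.mem_cons_self)

theorem pyIntersectAll_nodup (ss : List (List Int)) : (pyIntersectAll ss).Nodup := by
  unfold pyIntersectAll
  exact ((PySem.List.sorted_perm _ _ _).symm.nodup) (PySem.Set.nodup_ofList _)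

-- the intersection does not depend on the order in which the sets are given
theorem pyIntersectAll_canon {ss ss' : List (List Int)} (h : ss ≠ []) (h' : ss' ≠ [])
    (hm : ∀ s, s ∈ ss' ↔ s ∈ ss) : pyIntersectAll ss' = pyIntersectAll ss := by
  have hp : (pyIntersectAll ss').Perm (pyIntersectAll ss) := by
    rw [List.perm_ext_iff_of_nodup (pyIntersectAll_nodup _) (pyIntersectAll_nodup _)]
    intro x
    rw [pyIntersectAll_mem h' x, pyIntersectAll_mem h x]
    constructor
    · exact fun hall s hs => hall s ((hm s).2 hs)
    · exact fun hall s hs => hall s ((hm s).1 hs)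
  exact hp.eq_of_pairwise (fun a b _ _ hab hba => le_antisymm hab hba)
    ((PySem.List.sorted_ofList_pairwise_lt _).imp (fun h => le_of_lt h))
    ((PySem.List.sorted_ofList_pairwise_lt _).imp (fun h => le_of_lt h))

-- the step function describing the head of A's stable insertion sort
def nciStep (m : Option (List Int)) (x : List Int) : Option (List Int) :=
  some (match m with | none => x | some y => if x.length < y.length then x else y)

theorem head?_insertBy (x : List Int) (acc : List (List Int)) :
    (PySem.List.insertBy (fun a b => decide (a.length < b.length)) x acc).head? =
      nciStep acc.head? x := by
  cases acc <;> simp only [PySem.List.insertBy, nciStep, List.head?_cons, List.head?_nil]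
  split <;> simp_all

theorem head?_foldl_insertBy :
    ∀ (l : List (List Int)) (acc : List (List Int)),
      (l.foldl (fun acc x => PySem.List.insertBy (fun a b => decide (a.length < b.length)) x acc)
          acc).head? = l.foldl nciStep acc.head?
  | [], _ => rfl
  | x :: l, acc => by
    simp only [List.foldl_cons]
    rw [head?_foldl_insertBy l _, head?_insertBy]

theorem head?_sorted (ss : List (List Int)) :
    (PySem.List.sorted ss (fun s => s.length) false).head? = ss.foldl nciStep none := by
  rw [PySem.List.sorted_eq_foldl_insertBy]
  exact head?_foldl_insertBy ss []

-- Python's min (first minimum, replace only on strict decrease) is the head of the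
-- stable sort by the same key
theorem min?_eq_head_sorted (ss : List (List Int)) :
    PySem.List.min? ss (fun s => s.length) =
      (PySem.List.sorted ss (fun s => s.length) false).head? := by
  rw [head?_sorted]
  unfold PySem.List.min?
  congr 1
  funext acc x
  cases acc <;> unfold nciStep
  · rfl
  · dsimp only; split <;> rfl

-- ===== VERDICT (by name: the statement is the Claim_ definition above) =====
theorem non_copying_intersection_py_spec : Claim_equal_non_copying_intersection_py := by
  intro sets _ hpre
  obtain ⟨hne, hnd⟩ := hpre
  unfold Spec_non_copying_intersection_py
  unfold non_copying_intersection_py non_copying_intersection_py_alt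
  dsimp only
  have hLne : PySem.List.sorted sets (fun s => s.length) false ≠ [] := by
    rw [Ne, PySem.List.sorted_eq_nil_iff]; exact hne
  obtain ⟨s₀, t, hL⟩ := List.exists_cons_of_ne_nil hLne
  have hmin : PySem.List.min? sets (fun s => s.length) = some s₀ := by
    rw [min?_eq_head_sorted, hL]; rfl
  have hcanon : pyIntersectAll (PySem.List.sorted sets (fun s => s.length) false) =
      pyIntersectAll sets :=
    pyIntersectAll_canon hne hLne (fun s => PySem.List.mem_sorted _ _ _ s)
  set r := pyIntersectAll sets with hr
  have hs₀mem : s₀ ∈ sets :=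
    (PySem.List.mem_sorted _ _ _ s₀).1 (hL ▸ List.mem_cons_self)
  have hsub : r ⊆ s₀ := fun x hx => (pyIntersectAll_mem hne x).1 hx s₀ hs₀mem
  have hnle : r.length ≤ s₀.length :=
    ((pyIntersectAll_nodup sets).subperm hsub).length_le
  rw [hmin, hcanon, hL]
  by_cases hall : sets.all (fun s => PySem.Set.issubset s₀ s) = true
  · -- the smallest set is contained in every set: it IS the intersection
    have hsub' : s₀ ⊆ r := by
      intro x hx
      rw [pyIntersectAll_mem hne x]
      intro s hs
      have := List.all_eq_true.1 hall s hs
      exact (PySem.Set.issubset_iff _ _).1 this x hx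
    have hperm : r.Perm s₀ :=
      (List.perm_ext_iff_of_nodup (pyIntersectAll_nodup sets) (hnd s₀ hs₀mem)).2
        (fun x => ⟨fun hx => hsub hx, fun hx => hsub' hx⟩)
    have hlen : r.length = s₀.length := hperm.length_eq
    have heqA : PySem.Set.equal s₀ r = true := by
      unfold PySem.Set.equal
      rw [Bool.and_eq_true, PySem.Set.issubset_iff, PySem.Set.issubset_iff]
      exact ⟨fun x hx => hsub' hx, fun x hx => hsub hx⟩
    simp [nciLoopA, hlen, heqA, hall]
  · -- some set misses an element of the smallest set: the intersection is strictly smaller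
    have hlt : r.length < s₀.length := by
      rcases lt_or_eq_of_le hnle with h | h
      · exact h
      · exfalso
        have hperm : r.Perm s₀ :=
          ((pyIntersectAll_nodup sets).subperm hsub).perm_of_length_le (le_of_eq h.symm)
        rw [List.all_eq_true] at hall
        push Not at hall
        obtain ⟨s, hs, hns⟩ := hall
        have : ¬ ∀ x ∈ s₀, x ∈ s := by
          intro hc
          exact hns ((PySem.Set.issubset_iff _ _).2 hc)
        push Not at this
        obtain ⟨x, hxm, hxn⟩ := this
        have hxr : x ∈ r := hperm.mem_iff.2 hxm
        exact hxn ((pyIntersectAll_mem hne x).1 hxr s hs)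
    simp [nciLoopA, hlt, hall]
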